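-- pv_equiv track=rewrite | github.com/rossh2/latin-vowel-length | syllabify.py | identify_syllable_type_Cstar
-- ===== SOURCE A (Python) =====
-- DOUBLE_CONSONANTS = 'xz'
--
-- VOWELS = 'aeiouy'
--
-- def identify_syllable_type_Cstar(syllable: str) -> str:
--     vowel_indices = [i for i, s in enumerate(syllable)
--                      if s in VOWELS]
--     if len(vowel_indices) == 0:
--         raise ValueError(
--             f'Invalid syllable structure: C* for syllable {syllable}')
--     coda = syllable[(vowel_indices[-1] + 1):]
--     if len(vowel_indices) == 1:
--         # C*V(C)...
--         if len(coda) == 0: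
--             return 'C*V'
--         if len(coda) == 1 and coda not in DOUBLE_CONSONANTS:
--             return 'C*VC'
--         else:
--             return 'C*VC*'
--     elif len(vowel_indices) == 2 and vowel_indices[0] + 1 == vowel_indices[1]:
--         # C*VV(C)...
--         if len(coda) == 0:
--             return 'C*VV'
--         elif len(coda) == 1 and coda not in DOUBLE_CONSONANTS:
--             return 'C*VVC'
--         else:
--             return 'C*VVC*'
--     else:
--         raise ValueError(
--             f'Invalid nucleus "VVV" or non-adjacent Vs for syllable {syllable}')
-- ===== SOURCE B (Python) =====
-- DOUBLE_CONSONANTS = 'xz'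
--
-- VOWELS = 'aeiouy'
--
-- def identify_syllable_type_Cstar(syllable: str) -> str:
--     # One left-to-right scan: skip the onset, measure the vowel run (nucleus),
--     # and classify by the run length and the remaining coda.
--     onset = 0
--     while onset < len(syllable) and syllable[onset] not in VOWELS:
--         onset += 1
--     end = onset
--     while end < len(syllable) and syllable[end] in VOWELS:
--         end += 1
--     nucleus = end - onset
--     coda = syllable[end:]
--     if nucleus == 0:
--         raise ValueError(
--             f'Invalid syllable structure: C* for syllable {syllable}')
--     if nucleus > 2 or any(c in VOWELS for c in coda):
--         raise ValueError(
--             f'Invalid nucleus "VVV" or non-adjacent Vs for syllable {syllable}')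
--     base = 'C*V' if nucleus == 1 else 'C*VV'
--     if coda == '':
--         return base
--     if len(coda) > 1 or coda in DOUBLE_CONSONANTS:
--         return base + 'C*'
--     return base + 'C'
-- ===== Notes on version B (the rewrite author's own statement) =====
-- stated objective: alternative
-- what changed: Replaces A's collection of all vowel indices plus positional/index arithmetic with a single left-to-right run scan (onset run, nucleus vowel run, coda remainder) classified by run lengths.
import Mathlib
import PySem

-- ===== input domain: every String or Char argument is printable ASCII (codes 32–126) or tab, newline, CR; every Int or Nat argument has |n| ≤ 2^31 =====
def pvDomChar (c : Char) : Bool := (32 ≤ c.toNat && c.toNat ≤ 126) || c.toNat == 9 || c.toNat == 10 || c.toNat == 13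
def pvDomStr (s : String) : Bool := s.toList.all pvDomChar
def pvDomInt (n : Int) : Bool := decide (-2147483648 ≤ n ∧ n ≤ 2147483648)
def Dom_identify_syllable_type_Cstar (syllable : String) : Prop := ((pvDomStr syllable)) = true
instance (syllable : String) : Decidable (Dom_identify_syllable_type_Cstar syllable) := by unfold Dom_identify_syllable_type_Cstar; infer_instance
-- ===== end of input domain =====

-- B replaces A's vowel-index collection and index arithmetic with a single onset/nucleus/coda run scan (alternative decomposition, same cost).


-- ===== PORT A =====
-- s in VOWELS (single char)
def pvIsVowel (c : Char) : Bool := c = 'a' || c = 'e' || c = 'i' || c = 'o' || c = 'u' || c = 'y'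

-- [i for i, s in enumerate(syllable) if s in VOWELS], starting the counter at i
def pvVowelIndices (i : Nat) : List Char → List Nat
  | [] => []
  | c :: cs => if pvIsVowel c then i :: pvVowelIndices (i + 1) cs else pvVowelIndices (i + 1) cs

def pvAcore (cs : List Char) : String :=
  let vi := pvVowelIndices 0 cs
  if vi.length = 0 then "" -- Python: raise ValueError (excluded by Pre_)
  else
    let coda := cs.drop (vi.getLastD 0 + 1)   -- syllable[(vowel_indices[-1] + 1):], nonnegative index
    if vi.length = 1 then
      if coda.length = 0 then "C*V"
      else if coda.length = 1 ∧ ¬ (PySem.Chars.isIn coda ['x', 'z'] = true) then "C*VC"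
      else "C*VC*"
    else if vi.length = 2 ∧ vi.getD 0 0 + 1 = vi.getD 1 0 then
      if coda.length = 0 then "C*VV"
      else if coda.length = 1 ∧ ¬ (PySem.Chars.isIn coda ['x', 'z'] = true) then "C*VVC"
      else "C*VVC*"
    else "" -- Python: raise ValueError (excluded by Pre_)

def identify_syllable_type_Cstar (syllable : String) : String := pvAcore syllable.toList

-- ===== PORT B =====
-- the first while loop: index of the first vowel (length of the onset run)
def pvOnsetLen : List Char → Nat
  | [] => 0
  | c :: cs => if pvIsVowel c then 0 else pvOnsetLen cs + 1

-- the second while loop: length of the leading vowel run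
def pvNucleusLen : List Char → Nat
  | [] => 0
  | c :: cs => if pvIsVowel c then pvNucleusLen cs + 1 else 0

def pvBcore (cs : List Char) : String :=
  let onset := pvOnsetLen cs
  let nucleus := pvNucleusLen (cs.drop onset)
  let coda := cs.drop (onset + nucleus)
  if nucleus = 0 then "" -- Python: raise ValueError (excluded by Pre_)
  else if 2 < nucleus ∨ coda.any pvIsVowel then "" -- Python: raise ValueError (excluded by Pre_)
  else
    let base := if nucleus = 1 then "C*V" else "C*VV"
    if coda = [] then base
    else if 1 < coda.length ∨ coda = ['x'] ∨ coda = ['z'] then base ++ "C*"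
    else base ++ "C"

def identify_syllable_type_Cstar_alt (syllable : String) : String := pvBcore syllable.toList

-- ===== PRECONDITION & SPEC =====
-- two adjacent vowels occur somewhere in the list
def pvAdjPair : List Char → Bool
  | a :: b :: rest => (pvIsVowel a && pvIsVowel b) || pvAdjPair (b :: rest)
  | _ => false

-- Pre_ excludes exactly the inputs on which A raises ValueError: no vowel at all,
-- three or more vowels, or two non-adjacent vowels.
def Pre_identify_syllable_type_Cstar (syllable : String) : Prop :=
  (syllable.toList.filter pvIsVowel).length = 1 ∨
  ((syllable.toList.filter pvIsVowel).length = 2 ∧ pvAdjPair syllable.toList = true)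
instance (syllable : String) : Decidable (Pre_identify_syllable_type_Cstar syllable) := by
  unfold Pre_identify_syllable_type_Cstar; infer_instance

def pvWitness_identify_syllable_type_Cstar : String := "tax"

def Spec_identify_syllable_type_Cstar (syllable : String) (out : String) : Prop := out = identify_syllable_type_Cstar_alt syllable
instance (syllable : String) (out : String) : Decidable (Spec_identify_syllable_type_Cstar syllable out) := by unfold Spec_identify_syllable_type_Cstar; infer_instance

-- ===== CLAIM (what is proved, stated in full; the proofs are below) =====
def Claim_equal_identify_syllable_type_Cstar : Prop := ∀ (syllable : String), Dom_identify_syllable_type_Cstar syllable → Pre_identify_syllable_type_Cstar syllable → Spec_identify_syllable_type_Cstar syllable (identify_syllable_type_Cstar syllable)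

-- ===== LEMMAS AND PROOFS =====

theorem vi_shift (cs : List Char) (i : Nat) :
    pvVowelIndices (i + 1) cs = (pvVowelIndices i cs).map (· + 1) := by
  induction cs generalizing i with
  | nil => rfl
  | cons c cs ih =>
    by_cases hc : pvIsVowel c <;> simp [pvVowelIndices, hc, ih (i + 1)]

theorem vi_nil (cs : List Char) (i : Nat) (h : cs.filter pvIsVowel = []) :
    pvVowelIndices i cs = [] := by
  induction cs generalizing i with
  | nil => rfl
  | cons c cs ih =>
    rw [List.filter_cons] at h
    by_cases hc : pvIsVowel c
    · rw [if_pos hc] at h; exact absurd h (by simp)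
    · rw [if_neg hc] at h
      simp [pvVowelIndices, hc, ih _ h]

theorem nucleus_nil (cs : List Char) (h : cs.filter pvIsVowel = []) :
    pvNucleusLen cs = 0 := by
  cases cs with
  | nil => rfl
  | cons c cs =>
    simp only [List.filter_cons] at h
    by_cases hc : pvIsVowel c
    · simp [hc] at h
    · simp [pvNucleusLen, hc]

theorem any_nil (cs : List Char) (h : cs.filter pvIsVowel = []) :
    cs.any pvIsVowel = false := by
  rw [List.filter_eq_nil_iff] at h
  simp only [List.any_eq_false]
  exact fun x hx => by simpa using h x hx

theorem vi_len (cs : List Char) (i : Nat) :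
    (pvVowelIndices i cs).length = (cs.filter pvIsVowel).length := by
  induction cs generalizing i with
  | nil => rfl
  | cons a l ihl =>
    by_cases ha : pvIsVowel a <;>
      simp [pvVowelIndices, ha, ihl]

theorem adjPair_le (l : List Char) (h : pvAdjPair l = true) :
    2 ≤ (l.filter pvIsVowel).length := by
  induction l with
  | nil => simp [pvAdjPair] at h
  | cons a l ih =>
    cases l with
    | nil => simp [pvAdjPair] at h
    | cons b r =>
      simp only [pvAdjPair, Bool.or_eq_true, Bool.and_eq_true] at h
      rcases h with ⟨ha, hb⟩ | h
      · simp [ha, hb]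
      · have := ih h
        by_cases ha : pvIsVowel a
        · rw [List.filter_cons, if_pos ha]; simp only [List.length_cons]; omega
        · rw [List.filter_cons, if_neg ha]; omega

theorem adjPair_cons_false (c : Char) (cs : List Char) (hc : pvIsVowel c = false) :
    pvAdjPair (c :: cs) = pvAdjPair cs := by
  cases cs with
  | nil => rfl
  | cons b r => simp [pvAdjPair, hc]

theorem isIn_single (d : Char) :
    PySem.Chars.isIn [d] ['x', 'z'] = true ↔ d = 'x' ∨ d = 'z' := by
  rw [PySem.Chars.isIn_iff_infix, List.singleton_infix_iff]
  simp

-- the common classification of the coda, A's branch order vs B's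
theorem classify (coda : List Char) (v vc vcs : String)
    (h1 : vc = v ++ "C") (h2 : vcs = v ++ "C*") :
    (if coda = [] then v
     else if coda.length = 1 ∧ PySem.Chars.isIn coda ['x', 'z'] = false then vc
     else vcs)
    = (if coda = [] then v
       else if 1 < coda.length ∨ coda = ['x'] ∨ coda = ['z'] then v ++ "C*"
       else v ++ "C") := by
  subst h1 h2
  cases coda with
  | nil => simp
  | cons d t =>
    cases t with
    | nil =>
      by_cases hd : d = 'x' ∨ d = 'z'
      · rcases hd with rfl | rfl <;>
          simp [show PySem.Chars.isIn ['x'] ['x', 'z'] = true from by decide,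
                show PySem.Chars.isIn ['z'] ['x', 'z'] = true from by decide]
      · have hf : PySem.Chars.isIn [d] ['x', 'z'] = false := by
          rw [Bool.eq_false_iff]; intro hh; exact hd ((isIn_single d).mp hh)
        rw [not_or] at hd
        simp [hf, hd.1, hd.2]
    | cons e t => simp

theorem core_eq (cs : List Char)
    (h : (cs.filter pvIsVowel).length = 1 ∨
         ((cs.filter pvIsVowel).length = 2 ∧ pvAdjPair cs = true)) :
    pvAcore cs = pvBcore cs := by
  induction cs with
  | nil => simp at h
  | cons c cs ih =>
    by_cases hc : pvIsVowel c
    · -- c is a vowel: at most one more vowel may follow, immediately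
      rcases h with h1 | ⟨h2, hadj⟩
      · -- exactly one vowel: cs is vowel-free
        have hnil : cs.filter pvIsVowel = [] := by
          rw [List.filter_cons, if_pos hc, List.length_cons] at h1
          exact List.length_eq_zero_iff.mp (by omega)
        have hvi : pvVowelIndices 0 (c :: cs) = [0] := by
          simp [pvVowelIndices, hc, vi_nil cs 1 hnil]
        have hB : pvNucleusLen (c :: cs) = 1 := by
          simp [pvNucleusLen, hc, nucleus_nil cs hnil]
        simp only [pvAcore, pvBcore, hvi, pvOnsetLen, hc, if_pos, List.drop_zero, hB,
          List.drop_succ_cons, any_nil cs hnil]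
        norm_num
        exact classify cs "C*V" "C*VC" "C*VC*" rfl rfl
      · -- two adjacent vowels: the second is the head of cs, the rest is vowel-free
        have h2' : (cs.filter pvIsVowel).length = 1 := by
          simp only [List.filter_cons, hc] at h2; simpa using h2
        cases cs with
        | nil => simp at h2'
        | cons b r =>
          by_cases hb : pvIsVowel b
          · have hnil : r.filter pvIsVowel = [] := by
              rw [List.filter_cons, if_pos hb, List.length_cons] at h2'
              exact List.length_eq_zero_iff.mp (by omega)
            have hvi : pvVowelIndices 0 (c :: b :: r) = [0, 1] := by
              simp [pvVowelIndices, hc, hb, vi_nil r 2 hnil]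
            have hB : pvNucleusLen (c :: b :: r) = 2 := by
              simp [pvNucleusLen, hc, hb, nucleus_nil r hnil]
            simp only [pvAcore, pvBcore, hvi, pvOnsetLen, hc, if_pos, List.drop_zero, hB,
              List.drop_succ_cons, any_nil r hnil]
            norm_num
            exact classify r "C*VV" "C*VVC" "C*VVC*" rfl rfl
          · -- the pair must start at c, but b is not a vowel: contradiction
            simp only [pvAdjPair, Bool.or_eq_true, Bool.and_eq_true] at hadj
            rcases hadj with ⟨_, hb'⟩ | hadj
            · exact absurd hb' hb
            · have := adjPair_le _ hadj
              omega
    · -- c is a consonant: both programs ignore it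
      have hc' : pvIsVowel c = false := by simpa using hc
      have hpre : (cs.filter pvIsVowel).length = 1 ∨
          ((cs.filter pvIsVowel).length = 2 ∧ pvAdjPair cs = true) := by
        simpa [List.filter_cons, hc', adjPair_cons_false c cs hc'] using h
      have hA : pvAcore (c :: cs) = pvAcore cs := by
        have hlen : (pvVowelIndices 0 cs).length = (cs.filter pvIsVowel).length :=
          vi_len cs 0
        rcases hpre with h1 | ⟨h2, _⟩
        · obtain ⟨a, hvi⟩ := List.length_eq_one_iff.mp (by omega : (pvVowelIndices 0 cs).length = 1)
          simp [pvAcore, pvVowelIndices, hc', vi_shift, hvi, List.drop_succ_cons]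
        · obtain ⟨a, b, hvi⟩ :=
            List.length_eq_two.mp (by omega : (pvVowelIndices 0 cs).length = 2)
          simp [pvAcore, pvVowelIndices, hc', vi_shift, hvi, List.drop_succ_cons]
      have hB : pvBcore (c :: cs) = pvBcore cs := by
        simp [pvBcore, pvOnsetLen, hc', List.drop_succ_cons, Nat.add_right_comm]
      rw [hA, hB]; exact ih hpre

-- ===== VERDICT (by name: the statement is the Claim_ definition above) =====
theorem identify_syllable_type_Cstar_spec : Claim_equal_identify_syllable_type_Cstar := by
  intro s _ hpre
  unfold Spec_identify_syllable_type_Cstar identify_syllable_type_Cstar identify_syllable_type_Cstar_alt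
  exact core_eq s.toList hpre
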